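-- pv_equiv track=rewrite | github.com/descentintomael/council-meeting-analyzer | scripts/voting_alignment.py | analyze_vote_patterns
-- ===== SOURCE A (Python) =====
-- from collections import defaultdict
--
-- def analyze_vote_patterns(votes: list, target_member: str = "Van Overbeek"):
--     """Analyze voting patterns by topic keywords."""
--     patterns = defaultdict(lambda: {"yes": 0, "no": 0, "recused": 0})
--
--     topic_keywords = {
--         "housing": ["housing", "apartment", "residential", "zoning", "development"],
--         "downtown": ["downtown", "main street", "parklet", "sidewalk cafe"],
--         "homelessness": ["homeless", "shelter", "encampment", "unhoused"],
--         "police": ["police", "public safety", "law enforcement", "crime"],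
--         "parks": ["park", "bidwell", "recreation", "trail"],
--         "budget": ["budget", "tax", "fee", "revenue", "spending"],
--         "business": ["business", "commercial", "retail", "restaurant", "bar"],
--     }
--
--     for date, title, clip_id, vote_record in votes:
--         if target_member not in vote_record:
--             continue
--
--         target_vote = vote_record[target_member]
--         title_lower = title.lower()
--
--         for topic, keywords in topic_keywords.items():
--             if any(kw in title_lower for kw in keywords):
--                 if target_vote in ["yes", "no", "recused"]:
--                     patterns[topic][target_vote] += 1
--
--     return patterns
-- ===== SOURCE B (Python) =====
-- from collections import Counter
--
-- def analyze_vote_patterns(votes: list, target_member: str = "Van Overbeek"):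
--     """Analyze voting patterns by topic keywords (staged pipeline: event list -> Counter -> dict)."""
--     topic_keywords = {
--         "housing": ["housing", "apartment", "residential", "zoning", "development"],
--         "downtown": ["downtown", "main street", "parklet", "sidewalk cafe"],
--         "homelessness": ["homeless", "shelter", "encampment", "unhoused"],
--         "police": ["police", "public safety", "law enforcement", "crime"],
--         "parks": ["park", "bidwell", "recreation", "trail"],
--         "budget": ["budget", "tax", "fee", "revenue", "spending"],
--         "business": ["business", "commercial", "retail", "restaurant", "bar"],
--     }
--
--     # Pass 1: flatten to a stream of (topic, vote) events.
--     events = [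
--         (topic, record[target_member])
--         for _date, title, _clip, record in votes
--         if target_member in record
--         and record[target_member] in ("yes", "no", "recused")
--         for tl in [title.lower()]
--         for topic, kws in topic_keywords.items()
--         if any(kw in tl for kw in kws)
--     ]
--
--     # Pass 2: aggregate once with a Counter keyed by (topic, vote).
--     counts = Counter(events)
--
--     # Pass 3: materialize the nested dict in first-occurrence order.
--     patterns = {}
--     for topic, _vote in events:
--         if topic not in patterns:
--             patterns[topic] = {v: counts[(topic, v)] for v in ("yes", "no", "recused")}
--     return patterns
-- ===== Notes on version B (the rewrite author's own statement) =====
-- stated objective: alternative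
-- what changed: Replaces A's single pass of in-place nested defaultdict increments with a staged functional pipeline: flatten the votes to a (topic, vote) event list, aggregate it once with a Counter keyed by pairs, then materialize the nested dict in first-occurrence order.
import Mathlib
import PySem

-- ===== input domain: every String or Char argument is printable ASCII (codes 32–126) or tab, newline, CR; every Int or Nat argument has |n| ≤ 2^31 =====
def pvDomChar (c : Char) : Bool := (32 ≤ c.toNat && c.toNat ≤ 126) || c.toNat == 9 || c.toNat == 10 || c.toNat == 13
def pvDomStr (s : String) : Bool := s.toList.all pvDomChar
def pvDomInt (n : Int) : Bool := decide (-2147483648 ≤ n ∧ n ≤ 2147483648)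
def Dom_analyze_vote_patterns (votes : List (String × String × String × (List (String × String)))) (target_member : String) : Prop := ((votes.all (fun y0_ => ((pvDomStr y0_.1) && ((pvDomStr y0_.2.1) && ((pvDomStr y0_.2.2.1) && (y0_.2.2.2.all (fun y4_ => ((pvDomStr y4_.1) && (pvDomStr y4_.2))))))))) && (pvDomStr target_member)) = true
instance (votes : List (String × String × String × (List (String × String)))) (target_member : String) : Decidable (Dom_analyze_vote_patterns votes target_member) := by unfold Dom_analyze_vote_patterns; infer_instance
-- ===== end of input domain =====

-- B replaces A's single pass of in-place nested-counter increments with a staged pipeline: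
-- flatten to a (topic, vote) event list, aggregate once with a Counter keyed by pairs, then
-- materialize the nested dict in first-occurrence order; same cost, different decomposition.

-- the topic_keywords table (identical literal in both Pythons)
def pvTable : List (String × List String) :=
  [("housing", ["housing", "apartment", "residential", "zoning", "development"]),
   ("downtown", ["downtown", "main street", "parklet", "sidewalk cafe"]),
   ("homelessness", ["homeless", "shelter", "encampment", "unhoused"]),
   ("police", ["police", "public safety", "law enforcement", "crime"]),
   ("parks", ["park", "bidwell", "recreation", "trail"]),
   ("budget", ["budget", "tax", "fee", "revenue", "spending"]),
   ("business", ["business", "commercial", "retail", "restaurant", "bar"])]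

-- the defaultdict's inner default {"yes": 0, "no": 0, "recused": 0}
def pvBase : PySem.Dict String Int := PySem.Dict.mk [("yes", 0), ("no", 0), ("recused", 0)]

-- ===== PORT A =====
def analyze_vote_patterns (votes : List (String × String × String × (List (String × String)))) (target_member : String) : List (String × List (String × Int)) :=
  let pats := votes.foldl (fun pats v =>
    match (PySem.Dict.mk v.2.2.2).get? target_member with
    | none => pats
    | some target_vote =>
      let title_lower := PySem.Str.lower v.2.1
      pvTable.foldl (fun pats tk =>
        if tk.2.any (fun kw => PySem.Str.isIn kw title_lower) then
          if target_vote ∈ (["yes", "no", "recused"] : List String) then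
            pats.insert tk.1 ((pats.getD tk.1 pvBase).modify target_vote 0 (· + 1))
          else pats
        else pats) pats) PySem.Dict.empty
  pats.items.map (fun p => (p.1, p.2.items))

-- ===== PORT B =====
-- pass 1 of Source B: the (topic, vote) event-list comprehension
def pvEvents (votes : List (String × String × String × (List (String × String)))) (target_member : String) : List (String × String) :=
  votes.flatMap (fun v =>
    match (PySem.Dict.mk v.2.2.2).get? target_member with
    | none => []
    | some tv =>
      if tv ∈ (["yes", "no", "recused"] : List String) then
        let tl := PySem.Str.lower v.2.1
        (pvTable.filter (fun tk => tk.2.any (fun kw => PySem.Str.isIn kw tl))).map (fun tk => (tk.1, tv))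
      else [])

def analyze_vote_patterns_alt (votes : List (String × String × String × (List (String × String)))) (target_member : String) : List (String × List (String × Int)) :=
  let events := pvEvents votes target_member
  let counts := PySem.Dict.counter events
  let pats := events.foldl (fun pats e =>
    if pats.contains e.1 then pats
    else pats.insert e.1 (PySem.Dict.mk
      [("yes", counts.getD (e.1, "yes") 0),
       ("no", counts.getD (e.1, "no") 0),
       ("recused", counts.getD (e.1, "recused") 0)])) PySem.Dict.empty
  pats.items.map (fun p => (p.1, p.2.items))

-- ===== PRECONDITION & SPEC =====
def Spec_analyze_vote_patterns (votes : List (String × String × String × (List (String × String)))) (target_member : String) (out : List (String × List (String × Int))) : Prop := out = analyze_vote_patterns_alt votes target_member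
instance (votes : List (String × String × String × (List (String × String)))) (target_member : String) (out : List (String × List (String × Int))) : Decidable (Spec_analyze_vote_patterns votes target_member out) := by unfold Spec_analyze_vote_patterns; infer_instance

-- ===== CLAIM (what is proved, stated in full; the proofs are below) =====
def Claim_equal_analyze_vote_patterns : Prop := ∀ (votes : List (String × String × String × (List (String × String)))) (target_member : String), Dom_analyze_vote_patterns votes target_member → Spec_analyze_vote_patterns votes target_member (analyze_vote_patterns votes target_member)

-- ===== LEMMAS AND PROOFS =====

-- A's increment 'patterns[topic][target_vote] += 1', as a step over one (topic, vote) event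
def pvBump (d : PySem.Dict String (PySem.Dict String Int)) (e : String × String) : PySem.Dict String (PySem.Dict String Int) :=
  d.insert e.1 ((d.getD e.1 pvBase).modify e.2 0 (· + 1))

-- A's guarded table fold is the bump-fold over that vote's events
theorem pvTable_fold (table : List (String × List String)) (c : String × List String → Bool) (tv : String)
    (d : PySem.Dict String (PySem.Dict String Int)) :
    table.foldl (fun pats tk => if c tk then
        pats.insert tk.1 ((pats.getD tk.1 pvBase).modify tv 0 (· + 1)) else pats) d =
      ((table.filter c).map (fun tk => (tk.1, tv))).foldl pvBump d := by
  induction table generalizing d with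
  | nil => rfl
  | cons tk rest ih =>
      simp only [List.foldl_cons, List.filter_cons]
      by_cases h : c tk = true
      · rw [if_pos h, h]; simp [ih, pvBump]
      · rw [if_neg h]; simp [h, ih]

-- A's whole vote loop is the bump-fold over the event stream
theorem pvA_eq_events (votes : List (String × String × String × (List (String × String)))) (target_member : String)
    (d : PySem.Dict String (PySem.Dict String Int)) :
    votes.foldl (fun pats v =>
      match (PySem.Dict.mk v.2.2.2).get? target_member with
      | none => pats
      | some target_vote =>
        pvTable.foldl (fun pats tk =>
          if tk.2.any (fun kw => PySem.Str.isIn kw (PySem.Str.lower v.2.1)) then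
            if target_vote ∈ (["yes", "no", "recused"] : List String) then
              pats.insert tk.1 ((pats.getD tk.1 pvBase).modify target_vote 0 (· + 1))
            else pats
          else pats) pats) d =
      (pvEvents votes target_member).foldl pvBump d := by
  induction votes generalizing d with
  | nil => rfl
  | cons v rest ih =>
      simp only [List.foldl_cons, pvEvents, List.flatMap_cons, List.foldl_append]
      rw [← pvEvents]
      cases hget : (PySem.Dict.mk v.2.2.2).get? target_member with
      | none => simp only [List.foldl_nil]; exact ih d
      | some tv =>
          by_cases hv : tv ∈ (["yes", "no", "recused"] : List String)
          · simp only [if_pos hv]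
            rw [pvTable_fold pvTable
              (fun tk => tk.2.any (fun kw => PySem.Str.isIn kw (PySem.Str.lower v.2.1))) tv d]
            exact ih _
          · simp only [if_neg hv, ite_self, PySem.List.foldl_ignore, List.foldl_nil]
            exact ih d

-- every event's vote is one of the three counted values
theorem pvEvents_valid (votes : List (String × String × String × (List (String × String)))) (target_member : String) :
    ∀ e ∈ pvEvents votes target_member, e.2 = "yes" ∨ e.2 = "no" ∨ e.2 = "recused" := by
  intro e he
  simp only [pvEvents, List.mem_flatMap] at he
  obtain ⟨v, -, he⟩ := he
  cases hget : (PySem.Dict.mk v.2.2.2).get? target_member with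
  | none => simp only [hget] at he; simp at he
  | some tv =>
      simp only [hget] at he
      by_cases hv : tv ∈ (["yes", "no", "recused"] : List String)
      · rw [if_pos hv] at he
        simp only [List.mem_map] at he
        obtain ⟨tk, -, rfl⟩ := he
        simpa using hv
      · rw [if_neg hv] at he; simp at he

-- lookup after the bump-fold: the inner modify-fold over this topic's votes
theorem pvBump_getD (es : List (String × String)) (d : PySem.Dict String (PySem.Dict String Int)) (t : String) :
    (es.foldl pvBump d).getD t pvBase =
      ((es.filter (fun e => e.1 == t)).map Prod.snd).foldl (fun i v => i.modify v 0 (· + 1)) (d.getD t pvBase) := by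
  induction es generalizing d with
  | nil => rfl
  | cons e es ih =>
      simp only [List.foldl_cons]
      by_cases h : e.1 = t
      · subst h
        rw [List.filter_cons_of_pos (by simp), List.map_cons, List.foldl_cons, ih]
        rw [show (pvBump d e).getD e.1 pvBase = (d.getD e.1 pvBase).modify e.2 0 (· + 1) from
          PySem.Dict.getD_insert_self _ _ _ _]
      · rw [List.filter_cons_of_neg (by simp [h]), ih]
        rw [show (pvBump d e).getD t pvBase = d.getD t pvBase from
          PySem.Dict.getD_insert_of_ne _ _ _ (fun hh => h hh.symm)]

-- counting a vote value among one topic's events is counting the pair in the stream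
theorem pvCount_events (es : List (String × String)) (t v : String) :
    ((es.filter (fun e => e.1 == t)).map Prod.snd).count v = es.count (t, v) := by
  induction es with
  | nil => rfl
  | cons e es ih =>
      simp only [List.filter_cons]
      by_cases h : e.1 = t
      · simp only [h, BEq.rfl]
        by_cases h2 : e.2 = v
        · have : e = (t, v) := by cases e; simp_all
          simp [this, ih]
        · have : e ≠ (t, v) := by cases e; simp_all
          simp [h2, this, ih]
      · have hb : (e.1 == t) = false := by simp [h]
        have : e ≠ (t, v) := by cases e; simp_all
        simp [hb, this, ih]

-- the inner modify-fold produces exactly the three counters, in place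
theorem pvInner_items (vs : List String) (h : ∀ v ∈ vs, v = "yes" ∨ v = "no" ∨ v = "recused") :
    (vs.foldl (fun i v => i.modify v 0 (· + 1)) pvBase).items =
      [("yes", (vs.count "yes" : Int)), ("no", (vs.count "no" : Int)), ("recused", (vs.count "recused" : Int))] := by
  have hkeys : (vs.foldl (fun i v => i.modify v 0 (· + 1)) pvBase).keys = ["yes", "no", "recused"] := by
    rw [PySem.Dict.keys_foldl_modify]
    rw [PySem.Set.update_eq_append_filter]
    rw [show ((PySem.Set.ofList vs).filter (fun y => !(PySem.Set.contains pvBase.keys y))) = [] from ?_]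
    · simp [pvBase, PySem.Dict.keys]
    · rw [List.filter_eq_nil_iff]
      intro y hy
      have := h y ((PySem.Set.mem_ofList _ _).1 hy)
      simp only [Bool.not_eq_true, PySem.Set.contains_eq_listContains]
      rcases this with rfl | rfl | rfl <;> decide
  have hnd : (vs.foldl (fun i v => i.modify v 0 (· + 1)) pvBase).keys.Nodup := by
    rw [hkeys]; decide
  rw [PySem.Dict.items_eq_map_keys _ hnd 0, hkeys]
  simp only [List.map_cons, List.map_nil]
  rw [PySem.Dict.getD_foldl_modify_add_one, PySem.Dict.getD_foldl_modify_add_one,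
      PySem.Dict.getD_foldl_modify_add_one]
  have h1 : pvBase.getD "yes" 0 = 0 := by decide
  have h2 : pvBase.getD "no" 0 = 0 := by decide
  have h3 : pvBase.getD "recused" 0 = 0 := by decide
  rw [h1, h2, h3]
  simp

-- keys of the bump-fold: topics in first-occurrence order
theorem pvBump_keys (es : List (String × String)) :
    (es.foldl pvBump PySem.Dict.empty).keys = PySem.Set.ofList (es.map Prod.fst) := by
  rw [show (List.foldl pvBump PySem.Dict.empty es) =
      (List.foldl (fun (d : PySem.Dict String (PySem.Dict String Int)) (e : String × String) =>
        d.insert (Prod.fst e) ((d.getD e.1 pvBase).modify e.2 0 (· + 1))) PySem.Dict.empty es) from rfl]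
  rw [PySem.Dict.keys_foldl_insert_key es Prod.fst
      (fun d e => (d.getD e.1 pvBase).modify e.2 0 (· + 1)) PySem.Dict.empty]
  simp [PySem.Dict.keys_empty, PySem.Set.update_nil_left]

theorem pvBump_nodup (es : List (String × String)) :
    (es.foldl pvBump PySem.Dict.empty).keys.Nodup := by
  rw [pvBump_keys]; exact PySem.Set.nodup_ofList _

-- B's materialization step
theorem pvMat_keys (es : List (String × String)) (f : String → PySem.Dict String Int)
    (d : PySem.Dict String (PySem.Dict String Int)) :
    (es.foldl (fun pats e => if pats.contains e.1 then pats else pats.insert e.1 (f e.1)) d).keys =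
      PySem.Set.update d.keys (es.map Prod.fst) := by
  induction es generalizing d with
  | nil => rfl
  | cons e es ih =>
      simp only [List.foldl_cons, List.map_cons, PySem.Set.update_cons]
      by_cases hc : d.contains e.1 = true
      · rw [if_pos hc, ih, PySem.Set.add_of_mem ((PySem.Dict.contains_iff_mem_keys _ _).1 hc)]
      · have hcf : d.contains e.1 = false := by simpa using hc
        rw [if_neg hc, ih]
        congr 1
        rw [PySem.Dict.keys_insert_of_not_contains _ _ hcf]
        rw [PySem.Set.add_of_not_mem]
        intro hmem
        exact (by simpa using hcf : ¬ d.contains e.1 = true) ((PySem.Dict.contains_iff_mem_keys _ _).2 hmem)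

theorem pvMat_getD (es : List (String × String)) (f : String → PySem.Dict String Int)
    (d : PySem.Dict String (PySem.Dict String Int)) (t : String) (dflt : PySem.Dict String Int) :
    (es.foldl (fun pats e => if pats.contains e.1 then pats else pats.insert e.1 (f e.1)) d).getD t dflt =
      if d.contains t then d.getD t dflt
      else if t ∈ es.map Prod.fst then f t else dflt := by
  induction es generalizing d with
  | nil =>
      simp only [List.foldl_nil, List.map_nil, List.not_mem_nil, if_false]
      by_cases hc : d.contains t = true
      · rw [if_pos hc]
      · rw [if_neg hc, PySem.Dict.getD_of_not_contains _ _ (by simpa using hc)]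
  | cons e es ih =>
      simp only [List.foldl_cons, List.map_cons, List.mem_cons]
      by_cases hc : d.contains e.1 = true
      · rw [if_pos hc, ih]
        by_cases hct : d.contains t = true
        · simp [hct]
        · have hne : ¬ t = e.1 := fun hh => (by simpa using hct : ¬ d.contains t = true) (hh ▸ hc)
          rw [if_neg hct, if_neg hct, if_congr (or_iff_right hne) rfl rfl]
      · rw [if_neg hc, ih]
        by_cases he : t = e.1
        · subst he
          rw [if_pos (PySem.Dict.contains_insert_self _ _ _), if_neg (by simpa using hc),
              if_pos (Or.inl rfl), PySem.Dict.getD_insert_self]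
        · have hci : (d.insert e.1 (f e.1)).contains t = d.contains t := by
            rw [PySem.Dict.contains_insert]; simp [he]
          rw [hci, show ((d.insert e.1 (f e.1)).getD t dflt) = d.getD t dflt from
            PySem.Dict.getD_insert_of_ne _ _ _ he]
          by_cases hct : d.contains t = true
          · simp [hct]
          · rw [if_neg hct, if_neg hct, if_congr (or_iff_right he) rfl rfl]

theorem pvMat_nodup (es : List (String × String)) (f : String → PySem.Dict String Int) :
    (es.foldl (fun pats e => if pats.contains e.1 then pats else pats.insert e.1 (f e.1)) PySem.Dict.empty).keys.Nodup := by
  rw [pvMat_keys]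
  exact PySem.Set.nodup_update _ _ (by decide)

-- ===== VERDICT (by name: the statement is the Claim_ definition above) =====
theorem analyze_vote_patterns_spec : Claim_equal_analyze_vote_patterns := by
  intro votes target_member _
  show analyze_vote_patterns votes target_member = analyze_vote_patterns_alt votes target_member
  unfold analyze_vote_patterns analyze_vote_patterns_alt
  dsimp only
  rw [pvA_eq_events votes target_member PySem.Dict.empty]
  set es := pvEvents votes target_member with hes
  set counts := PySem.Dict.counter es with hcounts
  set f : String → PySem.Dict String Int := fun t => PySem.Dict.mk
      [("yes", counts.getD (t, "yes") 0), ("no", counts.getD (t, "no") 0),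
       ("recused", counts.getD (t, "recused") 0)] with hf
  -- both sides: items = keys.map (fun t => (t, value t)), same key list
  rw [PySem.Dict.items_eq_map_keys _ (pvBump_nodup es) pvBase,
      PySem.Dict.items_eq_map_keys _ (pvMat_nodup es f) pvBase,
      pvBump_keys, pvMat_keys, PySem.Dict.keys_empty, PySem.Set.update_nil_left,
      List.map_map, List.map_map]
  apply List.map_congr_left
  intro t ht
  have htmem : t ∈ es.map Prod.fst := (PySem.Set.mem_ofList _ _).1 ht
  simp only [Function.comp]
  congr 1
  -- A-side inner dict items = B-side entry items at topic t
  rw [pvBump_getD es PySem.Dict.empty t,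
      show (PySem.Dict.empty : PySem.Dict String (PySem.Dict String Int)).getD t pvBase = pvBase from rfl]
  rw [pvInner_items _ (fun v hv => by
        simp only [List.mem_map] at hv
        obtain ⟨e, he, rfl⟩ := hv
        exact pvEvents_valid votes target_member e (List.mem_of_mem_filter he))]
  rw [pvMat_getD es f PySem.Dict.empty t pvBase,
      if_neg (by simp), if_pos htmem, hf]
  simp only [hcounts, PySem.Dict.getD_counter]
  rw [pvCount_events, pvCount_events, pvCount_events]
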